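-- pv_equiv track=rewrite | github.com/iamjr15/mcp-coding-agent-puchai | utils/download_manager.py | _create_filename_slug
-- ===== SOURCE A (Python) =====
-- def _create_filename_slug(prompt: str) -> str:
--     """Create a safe filename slug from the user prompt.
--
--     Args:
--         prompt: Original user prompt
--
--     Returns:
--         Safe filename slug
--     """
--     # Take first 30 characters and clean them up
--     slug = prompt[:30].lower()
--
--     # Replace spaces and special characters with hyphens
--     safe_chars = "abcdefghijklmnopqrstuvwxyz0123456789-"
--     slug = "".join(c if c in safe_chars else "-" for c in slug)
--
--     # Remove consecutive hyphens and trim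
--     while "--" in slug:
--         slug = slug.replace("--", "-")
--     slug = slug.strip("-")
--
--     # Ensure it's not empty
--     if not slug:
--         slug = "generated-mcp"
--
--     return slug
-- ===== SOURCE B (Python) =====
-- def _create_filename_slug(prompt: str) -> str:
--     """Create a safe filename slug from the user prompt (single-pass)."""
--     safe_chars = "abcdefghijklmnopqrstuvwxyz0123456789-"
--     out = []
--     last_hyphen = False
--     for c in prompt[:30].lower():
--         c2 = c if c in safe_chars else "-"
--         if c2 == "-":
--             if not last_hyphen:
--                 out.append("-")
--                 last_hyphen = True
--         else:
--             out.append(c2)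
--             last_hyphen = False
--     slug = "".join(out).strip("-")
--     return slug if slug else "generated-mcp"
-- ===== Notes on version B (the rewrite author's own statement) =====
-- stated objective: simpler
-- what changed: Replaces A's map-then-repeated-replace('--','-')-until-fixpoint loop with a single pass over the 30-char lowercased prefix that emits a hyphen only when the last emitted char is not already a hyphen (tracked by a flag), then strips and defaults.
import Mathlib
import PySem

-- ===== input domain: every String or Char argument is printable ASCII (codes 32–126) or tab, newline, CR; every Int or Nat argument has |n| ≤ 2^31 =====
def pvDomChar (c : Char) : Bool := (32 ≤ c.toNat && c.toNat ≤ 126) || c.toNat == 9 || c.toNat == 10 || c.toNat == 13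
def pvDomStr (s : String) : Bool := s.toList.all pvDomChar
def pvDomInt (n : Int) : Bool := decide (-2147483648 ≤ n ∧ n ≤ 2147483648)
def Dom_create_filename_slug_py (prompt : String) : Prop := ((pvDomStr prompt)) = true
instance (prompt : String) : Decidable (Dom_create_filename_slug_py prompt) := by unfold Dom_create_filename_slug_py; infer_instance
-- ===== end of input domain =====

-- B collapses hyphen runs in one pass instead of A's replace("--","-")-until-fixpoint loop; return values proved equal on all inputs.

-- ===== PORT A =====
-- model of one pass of slug.replace("--", "-") (left-to-right, non-overlapping);
-- needed above the port because slugLoopA's termination proof cites the lemmas below.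
def pvRep1 : List Char → List Char
  | [] => []
  | '-' :: '-' :: t => '-' :: pvRep1 t
  | c :: t => c :: pvRep1 t

theorem pvRep1_two (t : List Char) : pvRep1 ('-' :: '-' :: t) = '-' :: pvRep1 t := rfl

theorem pvRep1_cons_of (c : Char) (t : List Char) (h : ∀ t', c = '-' → t ≠ '-' :: t') :
    pvRep1 (c :: t) = c :: pvRep1 t := by
  rw [pvRep1.eq_def]
  split
  · simp_all
  · rename_i t2 h2
    injection h2 with hc ht
    exact absurd ht (h _ hc)
  · rename_i c2 t2 hfall heq
    injection heq with hc ht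
    rw [hc, ht]

theorem pvNotPrefix_elim (c : Char) (t : List Char)
    (hc : ¬ List.isPrefixOf ['-', '-'] (c :: t) = true) :
    ∀ t', c = '-' → t ≠ '-' :: t' := by
  intro t' h1 h2
  subst h1; subst h2
  simp [List.isPrefixOf] at hc

theorem pvReplaceGo_eq (fuel : Nat) (s acc : List Char) (h : s.length ≤ fuel) :
    PySem.Chars.replace.go ['-', '-'] ['-'] fuel s acc = acc.reverse ++ pvRep1 s := by
  induction fuel generalizing s acc with
  | zero =>
    cases s with
    | nil => simp [PySem.Chars.replace.go, pvRep1]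
    | cons c t => simp at h
  | succ n ih =>
    match s with
    | [] => simp [PySem.Chars.replace.go, pvRep1]
    | c :: t =>
      rw [PySem.Chars.replace.go]
      by_cases hc : List.isPrefixOf ['-', '-'] (c :: t) = true
      · -- the pattern matches here: c = '-' and t = '-' :: t'
        match c, t, hc with
        | _, _ :: t', hc =>
          simp [List.isPrefixOf] at hc
          obtain ⟨rfl, rfl⟩ := hc
          rw [if_pos (by simp [List.isPrefixOf])]
          rw [show List.drop (['-', '-'] : List Char).length ('-' :: '-' :: t') = t' from rfl,
            show (['-'] : List Char).reverse ++ acc = '-' :: acc from rfl]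
          rw [ih t' ('-' :: acc) (by simp at h ⊢; omega)]
          rw [pvRep1_two]
          simp
        | _, [], hc => simp [List.isPrefixOf] at hc
      · rw [if_neg hc]
        rw [ih t (c :: acc) (by simp at h ⊢; omega)]
        rw [pvRep1_cons_of c t (pvNotPrefix_elim c t hc)]
        simp

theorem pvReplace_eq (s : List Char) :
    PySem.Chars.replace s ['-', '-'] ['-'] = pvRep1 s := by
  rw [PySem.Chars.replace]
  simp only [List.isEmpty_cons, Bool.false_eq_true, if_false]
  exact pvReplaceGo_eq s.length s [] le_rfl

theorem pvRep1_length_le (s : List Char) : (pvRep1 s).length ≤ s.length := by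
  induction s using pvRep1.induct with
  | case1 => simp [pvRep1]
  | case2 t ih => rw [pvRep1_two]; simp at ih ⊢; omega
  | case3 c t hnm ih =>
    rw [pvRep1_cons_of c t hnm]
    simp at ih ⊢; omega

theorem pvRep1_length_lt (s : List Char) (h : ['-', '-'] <:+: s) :
    (pvRep1 s).length < s.length := by
  induction s using pvRep1.induct with
  | case1 => simp at h
  | case2 t ih =>
    have := pvRep1_length_le t
    rw [pvRep1_two]; simp; omega
  | case3 c t hnm ih =>
    rw [pvRep1_cons_of c t hnm]
    have ht : ['-', '-'] <:+: t := by
      obtain ⟨l, r, hlr⟩ := h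
      cases l with
      | nil =>
        have hlr' : ('-' :: '-' :: r : List Char) = c :: t := by simpa using hlr
        injection hlr' with hc ht
        exact absurd ht.symm (hnm r hc.symm)
      | cons x l' =>
        refine ⟨l', r, ?_⟩
        simpa using congrArg List.tail hlr
    have := ih ht
    simp at this ⊢; omega

-- the while "--" in slug: slug = slug.replace("--", "-") loop of A
def slugLoopA (s : List Char) : List Char :=
  if h : PySem.Chars.isIn ['-', '-'] s = true then
    slugLoopA (PySem.Chars.replace s ['-', '-'] ['-'])
  else s
termination_by s.length
decreasing_by
  rw [pvReplace_eq]
  exact pvRep1_length_lt s ((PySem.Chars.isIn_iff_infix _ _).mp h)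

def create_filename_slug_py (prompt : String) : String :=
  -- slug = prompt[:30].lower()
  let slug := PySem.Chars.lower (PySem.Chars.slice prompt.toList none (some 30))
  -- safe_chars = "abcdefghijklmnopqrstuvwxyz0123456789-"
  let safe_chars := "abcdefghijklmnopqrstuvwxyz0123456789-".toList
  -- "".join(c if c in safe_chars else "-" for c in slug); 'c in safe_chars' for a
  -- single char is exactly list membership of that char
  let slug := slug.map (fun c => if safe_chars.contains c then c else '-')
  -- while "--" in slug: slug = slug.replace("--", "-")
  let slug := slugLoopA slug
  -- slug = slug.strip("-")
  let slug := PySem.Chars.stripChars slug ['-']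
  -- if not slug: slug = "generated-mcp"
  if slug.isEmpty then "generated-mcp" else String.ofList slug

-- ===== PORT B =====
def create_filename_slug_py_alt (prompt : String) : String :=
  let safe_chars := "abcdefghijklmnopqrstuvwxyz0123456789-".toList
  -- single pass over prompt[:30].lower(), accumulator (reversed output, last_hyphen flag)
  let cs := PySem.Chars.lower (PySem.Chars.slice prompt.toList none (some 30))
  let st := cs.foldl (fun (st : List Char × Bool) c =>
      let c2 := if safe_chars.contains c then c else '-'
      if c2 = '-' then (if st.2 then st else ('-' :: st.1, true))
      else (c2 :: st.1, false)) (([] : List Char), false)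
  let slug := PySem.Chars.stripChars st.1.reverse ['-']
  if slug.isEmpty then "generated-mcp" else String.ofList slug

-- ===== PRECONDITION & SPEC =====
def Spec_create_filename_slug_py (prompt : String) (out : String) : Prop := out = create_filename_slug_py_alt prompt
instance (prompt : String) (out : String) : Decidable (Spec_create_filename_slug_py prompt out) := by unfold Spec_create_filename_slug_py; infer_instance

-- ===== CLAIM (what is proved, stated in full; the proofs are below) =====
def Claim_equal_create_filename_slug_py : Prop := ∀ (prompt : String), Dom_create_filename_slug_py prompt → Spec_create_filename_slug_py prompt (create_filename_slug_py prompt)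

-- ===== LEMMAS AND PROOFS =====
-- model of the collapsed string: dedup adjacent hyphens, flag = "last kept char was '-'"
def pvDed : Bool → List Char → List Char
  | _, [] => []
  | b, c :: t =>
    if c = '-' then (if b then pvDed true t else '-' :: pvDed true t)
    else c :: pvDed false t

theorem pvDed_rep1 (s : List Char) : ∀ b, pvDed b (pvRep1 s) = pvDed b s := by
  induction s using pvRep1.induct with
  | case1 => intro b; rfl
  | case2 t ih =>
    intro b
    rw [pvRep1_two]
    cases b <;> simp [pvDed, ih]
  | case3 c t hnm ih =>
    intro b
    rw [pvRep1_cons_of c t hnm]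
    by_cases hc : c = '-' <;> cases b <;> simp [pvDed, hc, ih]

theorem pvDed_true_of_head (t : List Char) (h : ∀ t', t ≠ '-' :: t') :
    pvDed true t = pvDed false t := by
  cases t with
  | nil => rfl
  | cons d t' =>
    have : d ≠ '-' := fun hd => h t' (by rw [hd])
    simp [pvDed, this]

theorem pvDed_false_of_noadj (s : List Char) (h : ¬ (['-', '-'] <:+: s)) :
    pvDed false s = s := by
  induction s with
  | nil => rfl
  | cons c t ih =>
    have ht : ¬ (['-', '-'] <:+: t) := fun ⟨l, r, hlr⟩ => h ⟨c :: l, r, by simp [hlr]⟩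
    by_cases hc : c = '-'
    · subst hc
      have hhead : ∀ t', t ≠ '-' :: t' := by
        intro t' he; exact h ⟨[], t', by simp [he]⟩
      simp [pvDed, pvDed_true_of_head t hhead, ih ht]
    · simp [pvDed, hc, ih ht]

theorem slugLoopA_eq (s : List Char) : slugLoopA s = pvDed false s := by
  induction s using slugLoopA.induct with
  | case1 s h ih =>
    rw [slugLoopA, dif_pos h, ih, pvReplace_eq, pvDed_rep1]
  | case2 s h =>
    rw [slugLoopA, dif_neg h,
      pvDed_false_of_noadj s ((PySem.Chars.isIn_eq_false_iff _ _).mp (by simpa using h))]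

theorem pvFoldB (f : Char → Char) (cs : List Char) : ∀ (acc : List Char) (b : Bool),
    (cs.foldl (fun (st : List Char × Bool) c =>
      let c2 := f c
      if c2 = '-' then (if st.2 then st else ('-' :: st.1, true))
      else (c2 :: st.1, false)) (acc, b)).1
    = (pvDed b (cs.map f)).reverse ++ acc := by
  induction cs with
  | nil => intro acc b; simp [pvDed]
  | cons c t ih =>
    intro acc b
    simp only [List.foldl_cons, List.map_cons]
    by_cases hc : f c = '-'
    · cases b with
      | true => simp [hc, pvDed, ih]
      | false => simp [hc, pvDed, ih]
    · simp [hc, pvDed, ih]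

-- ===== VERDICT (by name: the statement is the Claim_ definition above) =====
theorem create_filename_slug_py_spec : Claim_equal_create_filename_slug_py := by
  intro prompt _
  unfold Spec_create_filename_slug_py create_filename_slug_py create_filename_slug_py_alt
  simp only [slugLoopA_eq,
    pvFoldB (fun c => if ("abcdefghijklmnopqrstuvwxyz0123456789-".toList).contains c then c else '-')
      (PySem.Chars.lower (PySem.Chars.slice prompt.toList none (some 30))) [] false]
  simp
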